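-- pv_equiv track=rewrite | github.com/toolwright/toolwright | toolwright/core/network_safety.py | host_matches_allowlist
-- ===== SOURCE A (Python) =====
-- def normalize_host_for_allowlist(value: str) -> str:
--     """Normalize a host string for allowlist comparison.
--
--     * Lowercases
--     * Strips trailing dot (DNS FQDN form)
--     * Strips IPv6 brackets (``[::1]`` → ``::1``)
--     * Strips port (``host:443`` → ``host``, ``[::1]:443`` → ``::1``)
--     """
--     raw = value.strip().lower().rstrip(".")
--     if not raw:
--         return ""
--
--     # Bracketed IPv6: [::1]:8443 or [::1]
--     if raw.startswith("["):
--         closing = raw.find("]")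
--         if closing > 0:
--             return raw[1:closing]
--         return raw
--
--     # host:port — only when there is exactly one colon (avoid splitting IPv6).
--     if raw.count(":") == 1:
--         host, port = raw.rsplit(":", 1)
--         if port.isdigit():
--             return host
--
--     return raw
--
-- def host_matches_allowlist(host: str, allowed_hosts: set[str]) -> bool:
--     """Check whether *host* matches any entry in *allowed_hosts*.
--
--     Both the candidate and each pattern are normalized before comparison.
--     Wildcard patterns like ``*.example.com`` match one level of subdomain.
--     """
--     normalized_host = normalize_host_for_allowlist(host)
--     for raw_pattern in allowed_hosts:
--         pattern = normalize_host_for_allowlist(raw_pattern)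
--         if not pattern:
--             continue
--         if pattern.startswith("*."):
--             suffix = pattern[2:]
--             if not suffix:
--                 continue
--             if (
--                 normalized_host.endswith(f".{suffix}")
--                 and normalized_host.count(".") == suffix.count(".") + 1
--             ):
--                 return True
--             continue
--         if normalized_host == pattern:
--             return True
--     return False
-- ===== SOURCE B (Python) =====
-- def normalize_host_for_allowlist(value: str) -> str:
--     raw = value.strip().lower().rstrip(".")
--     if not raw:
--         return ""
--     if raw.startswith("["):
--         closing = raw.find("]")
--         if closing > 0:
--             return raw[1:closing]
--         return raw
--     if raw.count(":") == 1:
--         host, port = raw.rsplit(":", 1)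
--         if port.isdigit():
--             return host
--     return raw
--
--
-- def host_matches_allowlist(host, allowed_hosts) -> bool:
--     # Build an index once: exact patterns and wildcard parent-domain suffixes.
--     exact = set()
--     wild = set()
--     for raw_pattern in allowed_hosts:
--         pattern = normalize_host_for_allowlist(raw_pattern)
--         if not pattern:
--             continue
--         if pattern.startswith("*."):
--             if pattern[2:]:
--                 wild.add(pattern[2:])
--         else:
--             exact.add(pattern)
--     h = normalize_host_for_allowlist(host)
--     if h in exact:
--         return True
--     if "." in h:
--         return h.split(".", 1)[1] in wild
--     return False
-- ===== Notes on version B (the rewrite author's own statement) =====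
-- stated objective: alternative
-- what changed: B replaces A's per-pattern loop with its endswith/dot-count wildcard scan by a single indexing pass that builds an exact-match set and a wildcard parent-domain-suffix set, then decides membership by one exact lookup plus one lookup of the host's parent domain (split('.',1)).
import Mathlib
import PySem

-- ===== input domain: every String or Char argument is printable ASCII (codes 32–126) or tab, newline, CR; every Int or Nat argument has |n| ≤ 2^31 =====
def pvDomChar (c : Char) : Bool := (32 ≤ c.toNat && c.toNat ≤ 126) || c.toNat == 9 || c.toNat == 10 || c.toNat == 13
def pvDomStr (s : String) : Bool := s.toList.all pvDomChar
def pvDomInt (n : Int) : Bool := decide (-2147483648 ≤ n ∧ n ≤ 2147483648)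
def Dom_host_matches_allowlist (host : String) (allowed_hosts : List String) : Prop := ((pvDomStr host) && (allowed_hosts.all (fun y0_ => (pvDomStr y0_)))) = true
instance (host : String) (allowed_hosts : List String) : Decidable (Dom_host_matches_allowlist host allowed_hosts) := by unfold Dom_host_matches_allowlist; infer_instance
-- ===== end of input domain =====

-- B replaces A's per-pattern endswith/dot-count scan by one indexing pass (exact-match set +
-- wildcard parent-domain suffix set) and a parent-domain lookup; objective: alternative/idiomatic.

-- ===== PORT A =====
-- shared helper normalize_host_for_allowlist, on List Char.
-- raw.rstrip(".") ported by hand (exact: strip the trailing run of '.'):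
def pvRstripDot (cs : List Char) : List Char := (cs.reverse.dropWhile (· == '.')).reverse

def pvNorm (value : List Char) : List Char :=
  let raw := pvRstripDot (PySem.Chars.lower (PySem.Chars.strip value))
  if raw = [] then []
  else if PySem.Chars.startswith raw ['['] then
    let closing := PySem.Chars.find raw [']']
    if 0 < closing then PySem.List.slice raw (some 1) (some closing) else raw
  else if PySem.Chars.count raw [':'] = 1 then
    -- raw.rsplit(":", 1) ported by hand: with exactly one ':' it splits at that colon
    let h := raw.takeWhile (· ≠ ':')
    let port := (raw.dropWhile (· ≠ ':')).tail
    if PySem.Chars.strIsdigit port then h else raw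
  else raw

def pvLoopA (nh : List Char) : List (List Char) → Bool
  | [] => false
  | raw_pattern :: rest =>
    let pattern := pvNorm raw_pattern
    if pattern = [] then pvLoopA nh rest
    else if PySem.Chars.startswith pattern ['*', '.'] then
      let suffix := PySem.List.slice pattern (some 2) none
      if suffix = [] then pvLoopA nh rest
      else if PySem.Chars.endswith nh ('.' :: suffix)
              && (PySem.Chars.count nh ['.'] == PySem.Chars.count suffix ['.'] + 1) then true
      else pvLoopA nh rest
    else if nh = pattern then true
    else pvLoopA nh rest

def host_matches_allowlist (host : String) (allowed_hosts : List String) : Bool :=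
  pvLoopA (pvNorm host.toList) (allowed_hosts.map String.toList)

-- ===== PORT B =====
def pvStep (st : PySem.Set (List Char) × PySem.Set (List Char)) (raw_pattern : List Char) :
    PySem.Set (List Char) × PySem.Set (List Char) :=
  let pattern := pvNorm raw_pattern
  if pattern = [] then st
  else if PySem.Chars.startswith pattern ['*', '.'] then
    if pattern.drop 2 = [] then st else (st.1, PySem.Set.add st.2 (pattern.drop 2))
  else (PySem.Set.add st.1 pattern, st.2)

-- h.split(".", 1)[1] (guarded by "." in h) ported by hand: everything after the first '.'
def pvParent (h : List Char) : List Char := (h.dropWhile (· ≠ '.')).tail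

def host_matches_allowlist_alt (host : String) (allowed_hosts : List String) : Bool :=
  let sets := (allowed_hosts.map String.toList).foldl pvStep (PySem.Set.empty, PySem.Set.empty)
  let h := pvNorm host.toList
  if PySem.Set.contains sets.1 h then true
  else if PySem.Chars.isIn ['.'] h then PySem.Set.contains sets.2 (pvParent h)
  else false

-- ===== PRECONDITION & SPEC =====
def Spec_host_matches_allowlist (host : String) (allowed_hosts : List String) (out : Bool) : Prop := out = host_matches_allowlist_alt host allowed_hosts
instance (host : String) (allowed_hosts : List String) (out : Bool) : Decidable (Spec_host_matches_allowlist host allowed_hosts out) := by unfold Spec_host_matches_allowlist; infer_instance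

-- ===== CLAIM (what is proved, stated in full; the proofs are below) =====
def Claim_equal_host_matches_allowlist : Prop := ∀ (host : String) (allowed_hosts : List String), Dom_host_matches_allowlist host allowed_hosts → Spec_host_matches_allowlist host allowed_hosts (host_matches_allowlist host allowed_hosts)

-- ===== LEMMAS AND PROOFS =====

-- B's final check, abstracted over the accumulated sets
def pvCheck (h : List Char) (st : PySem.Set (List Char) × PySem.Set (List Char)) : Bool :=
  if PySem.Set.contains st.1 h then true
  else if PySem.Chars.isIn ['.'] h then PySem.Set.contains st.2 (pvParent h)
  else false

theorem pvCountGoSingle (t : List Char) (acc : Nat) :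
    PySem.Chars.count.go ['.'] t.length t acc = acc + t.count '.' := by
  induction t generalizing acc with
  | nil => simp [PySem.Chars.count.go]
  | cons c t ih =>
    show PySem.Chars.count.go ['.'] (t.length + 1) (c :: t) acc = _
    rw [PySem.Chars.count.go]
    by_cases hc : c = '.'
    · subst hc; simp [List.isPrefixOf, ih]; omega
    · simp [List.isPrefixOf, hc, ih, Ne.symm hc]

theorem pvCountDot (h : List Char) : PySem.Chars.count h ['.'] = h.count '.' := by
  cases h with
  | nil => rfl
  | cons c t => simpa [PySem.Chars.count] using pvCountGoSingle (c :: t) 0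

theorem pvDropWhile_mem (h : List Char) (hm : '.' ∈ h) :
    h.dropWhile (· ≠ '.') = '.' :: pvParent h := by
  induction h with
  | nil => cases hm
  | cons c t ih =>
    by_cases hc : c = '.'
    · subst hc; simp [pvParent]
    · have hmt : '.' ∈ t := by cases hm with
        | head => exact absurd rfl hc
        | tail _ h => exact h
      simp only [List.dropWhile_cons, pvParent, ne_eq, hc, not_false_eq_true, decide_true]
      exact ih hmt

-- the wildcard test equivalence: endswith + dot-count  ==  has-dot + parent-equals
theorem pvWildEq (h s : List Char) :
    (PySem.Chars.endswith h ('.' :: s)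
      && (PySem.Chars.count h ['.'] == PySem.Chars.count s ['.'] + 1))
    = (PySem.Chars.isIn ['.'] h && (pvParent h == s)) := by
  rw [pvCountDot, pvCountDot]
  rcases Bool.eq_false_or_eq_true (PySem.Chars.isIn ['.'] h) with hin | hin
  case inr =>
    -- no dot in h: both sides false
    have hnm : '.' ∉ h := by
      intro hm
      obtain ⟨u, v, rfl⟩ := List.append_of_mem hm
      have hinf : (['.'] : List Char) <:+: u ++ '.' :: v := ⟨u, v, by simp⟩
      rw [(PySem.Chars.isIn_iff_infix _ _).2 hinf] at hin; cases hin
    rw [hin]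
    simp only [Bool.false_and, Bool.and_eq_false_imp]
    intro hend
    have hsuf : ('.' :: s) <:+ h := (PySem.Chars.endswith_iff _ _).1 hend
    obtain ⟨u, rfl⟩ := hsuf
    exact absurd (by simp) hnm
  case inl =>
    have hm : '.' ∈ h := by
      obtain ⟨u, v, rfl⟩ := (PySem.Chars.isIn_iff_infix _ _).1 hin
      simp
    rw [hin, Bool.true_and]
    have hsplit := List.takeWhile_append_dropWhile (p := fun c => decide (c ≠ '.')) (l := h)
    have hdw := pvDropWhile_mem h hm
    have htw : ('.' : Char) ∉ h.takeWhile (· ≠ '.') := by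
      intro hx
      have := List.mem_takeWhile_imp hx
      simp at this
    cases hpe : (pvParent h == s) with
    | true =>
      have hps : pvParent h = s := by simpa using hpe
      rw [← hsplit, hdw, hps]
      simp only [Bool.and_eq_true, beq_iff_eq]
      constructor
      · exact (PySem.Chars.endswith_iff _ _).2 (List.suffix_append _ _)
      · have h0 : List.count '.' (h.takeWhile (· ≠ '.')) = 0 := List.count_eq_zero.2 htw
        simp only [List.count_append, List.count_cons_self]
        simp at h0 ⊢
        omega
    | false =>
      simp only [Bool.and_eq_false_imp]
      intro hend
      have hsuf : ('.' :: s) <:+ h := (PySem.Chars.endswith_iff _ _).1 hend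
      obtain ⟨u, hu⟩ := hsuf
      by_cases hcu : '.' ∈ u
      · -- a dot in u: counts cannot match
        rw [← hu]
        simp only [List.count_append, List.count_cons_self, beq_eq_false_iff_ne, ne_eq]
        have : 1 ≤ u.count '.' := List.one_le_count_iff.2 hcu
        omega
      · -- no dot in u: parent = s, contradicting hpe
        exfalso
        have hds : h.dropWhile (· ≠ '.') = '.' :: s := by
          rw [← hu, List.dropWhile_append]
          have hdu : u.dropWhile (fun c => decide (c ≠ '.')) = [] := by
            rw [List.dropWhile_eq_nil_iff]
            intro x hx
            simp only [ne_eq, decide_eq_true_eq]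
            intro hxe
            exact hcu (hxe ▸ hx)
          simp only [hdu, List.isEmpty_nil, if_true]
          simp
        have hps : pvParent h = s := by
          have h2 := hdw.symm.trans hds
          simpa using h2
        rw [hps] at hpe
        simp at hpe

theorem pvCheck_step (h : List Char) (st : PySem.Set (List Char) × PySem.Set (List Char)) (p : List Char) :
    pvCheck h (pvStep st p) = (pvCheck h st || pvLoopA h [p]) := by
  have hslice : PySem.List.slice (pvNorm p) (some 2) none = (pvNorm p).drop 2 := by
    simp only [Nat.ofNat_nonneg, PySem.List.slice_from, Int.reduceToNat]
  by_cases h1 : pvNorm p = []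
  · simp [pvStep, pvLoopA, h1]
  by_cases h2 : PySem.Chars.startswith (pvNorm p) ['*', '.'] = true
  · by_cases h3 : (pvNorm p).drop 2 = []
    · simp [pvStep, pvLoopA, h1, h2, hslice, h3]
    · have hW := pvWildEq h ((pvNorm p).drop 2)
      simp only [pvStep, pvLoopA, pvCheck, hslice, if_neg h1, if_pos h2, if_neg h3]
      cases hc1 : PySem.Set.contains st.1 h <;>
        cases hc2 : PySem.Chars.isIn ['.'] h <;>
        cases hc3 : PySem.Set.contains st.2 (pvParent h) <;>
          simp_all
  · cases hc1 : PySem.Set.contains st.1 h <;>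
      cases hc2 : PySem.Chars.isIn ['.'] h <;>
      cases hc3 : PySem.Set.contains st.2 (pvParent h) <;>
        simp_all [pvStep, pvLoopA, pvCheck]

theorem pvCheck_foldl (h : List Char) (l : List (List Char))
    (st : PySem.Set (List Char) × PySem.Set (List Char)) :
    pvCheck h (l.foldl pvStep st) = (pvCheck h st || pvLoopA h l) := by
  induction l generalizing st with
  | nil => simp [pvLoopA]
  | cons p rest ih =>
    show pvCheck h ((rest.foldl pvStep (pvStep st p))) = _
    rw [ih, pvCheck_step]
    cases hA : pvLoopA h [p] <;> cases hc : pvCheck h st <;>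
      simp_all [pvLoopA] <;> split_ifs at * <;> simp_all

-- ===== VERDICT (by name: the statement is the Claim_ definition above) =====
theorem host_matches_allowlist_spec : Claim_equal_host_matches_allowlist := by
  intro host allowed_hosts _
  show _ = _
  unfold host_matches_allowlist host_matches_allowlist_alt
  show pvLoopA (pvNorm host.toList) _
      = pvCheck (pvNorm host.toList)
          (List.foldl pvStep (PySem.Set.empty, PySem.Set.empty) (allowed_hosts.map String.toList))
  rw [pvCheck_foldl]
  simp [pvCheck, PySem.Set.empty, PySem.Set.contains]
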